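-- pv_equiv track=rewrite | github.com/burnsaustin145/Markov_1 | fetch_data.py | strdir_2
-- ===== SOURCE A (Python) =====
-- def strdir_2(text_data):
--     alphabet = \
--         ['a', 'b', 'c', 'd', 'e', 'f',
--          'g', 'h', 'i', 'j', 'k', 'l',
--          'm', 'n', 'o', 'p', 'q', 'r',
--          's', 't', 'u', 'v', 'w', 'x',
--          'y', 'z'
--          ]
--     strtext_data = ''.lower()
--     for x in text_data:
--         if x in alphabet:
--             strtext_data += x
--         elif x == ' ':
--             strtext_data += x
--         else:
--             pass
--     return strtext_data
-- ===== SOURCE B (Python) =====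
-- import re
--
-- def strdir_2(text_data):
--     return re.sub(r'[^a-z ]', '', text_data)
-- ===== Notes on version B (the rewrite author's own statement) =====
-- stated objective: idiomatic
-- what changed: Replaced the per-character loop with list membership and string concatenation by a single regex substitution deleting every character outside [a-z ].
import Mathlib
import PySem

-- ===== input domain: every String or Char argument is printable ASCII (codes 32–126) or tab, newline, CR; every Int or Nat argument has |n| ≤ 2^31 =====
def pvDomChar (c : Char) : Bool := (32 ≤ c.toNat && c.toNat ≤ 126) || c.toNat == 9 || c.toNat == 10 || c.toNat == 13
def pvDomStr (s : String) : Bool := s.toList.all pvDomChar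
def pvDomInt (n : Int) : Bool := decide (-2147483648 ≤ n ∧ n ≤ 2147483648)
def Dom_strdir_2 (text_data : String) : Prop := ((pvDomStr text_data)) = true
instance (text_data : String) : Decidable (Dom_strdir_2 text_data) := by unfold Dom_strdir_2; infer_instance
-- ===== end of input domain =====

-- B replaces A's per-character loop (list-membership test + string concatenation)
-- by a single regex deletion of every character outside [a-z ]; idiomatic, same cost.

-- ===== PORT A =====
-- the literal 26-letter alphabet list from A
def strdir2Alphabet : List Char :=
  ['a', 'b', 'c', 'd', 'e', 'f',
   'g', 'h', 'i', 'j', 'k', 'l',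
   'm', 'n', 'o', 'p', 'q', 'r',
   's', 't', 'u', 'v', 'w', 'x',
   'y', 'z']

def strdir_2 (text_data : String) : String :=
  -- strtext_data = ''.lower()  (the empty string); loop appends characters
  String.mk <|
    text_data.toList.foldl
      (fun strtext_data x =>
        if x ∈ strdir2Alphabet then strtext_data ++ [x]
        else if x = ' ' then strtext_data ++ [x]
        else strtext_data)
      []

-- ===== PORT B =====
-- re.sub(r'[^a-z ]', '', text_data): keep exactly the characters in the class [a-z ]
def strdir_2_alt (text_data : String) : String :=
  String.mk (text_data.toList.filter (fun c => ('a' ≤ c && c ≤ 'z') || c == ' '))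

-- ===== PRECONDITION & SPEC =====
def Spec_strdir_2 (text_data : String) (out : String) : Prop := out = strdir_2_alt text_data
instance (text_data : String) (out : String) : Decidable (Spec_strdir_2 text_data out) := by unfold Spec_strdir_2; infer_instance

-- ===== CLAIM (what is proved, stated in full; the proofs are below) =====
def Claim_equal_strdir_2 : Prop := ∀ (text_data : String), Dom_strdir_2 text_data → Spec_strdir_2 text_data (strdir_2 text_data)

-- ===== LEMMAS AND PROOFS =====

lemma strdir2_char_eq (c d : Char) : (c = d) ↔ c.toNat = d.toNat := by
  constructor
  · rintro rfl; rfl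
  · intro h
    exact Char.ext (UInt32.toNat_inj.mp h)

lemma strdir2_mem_alpha (c : Char) :
    (c ∈ strdir2Alphabet) ↔ (97 ≤ c.toNat ∧ c.toNat ≤ 122) := by
  have ha : ('a').toNat = 97 := rfl
  have hb : ('b').toNat = 98 := rfl
  have hc : ('c').toNat = 99 := rfl
  have hd : ('d').toNat = 100 := rfl
  have he : ('e').toNat = 101 := rfl
  have hf : ('f').toNat = 102 := rfl
  have hg : ('g').toNat = 103 := rfl
  have hh : ('h').toNat = 104 := rfl
  have hi : ('i').toNat = 105 := rfl
  have hj : ('j').toNat = 106 := rfl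
  have hk : ('k').toNat = 107 := rfl
  have hl : ('l').toNat = 108 := rfl
  have hm : ('m').toNat = 109 := rfl
  have hn : ('n').toNat = 110 := rfl
  have ho : ('o').toNat = 111 := rfl
  have hp : ('p').toNat = 112 := rfl
  have hq : ('q').toNat = 113 := rfl
  have hr : ('r').toNat = 114 := rfl
  have hs : ('s').toNat = 115 := rfl
  have ht : ('t').toNat = 116 := rfl
  have hu : ('u').toNat = 117 := rfl
  have hv : ('v').toNat = 118 := rfl
  have hw : ('w').toNat = 119 := rfl
  have hx : ('x').toNat = 120 := rfl
  have hy : ('y').toNat = 121 := rfl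
  have hz : ('z').toNat = 122 := rfl
  simp only [strdir2Alphabet, List.mem_cons, List.not_mem_nil, or_false,
    strdir2_char_eq]
  omega

lemma strdir2_cond (c : Char) :
    (if c ∈ strdir2Alphabet then true else if c = ' ' then true else false)
      = (('a' ≤ c && c ≤ 'z') || c == ' ') := by
  have hm := strdir2_mem_alpha c
  have hle : ('a' ≤ c) = decide (97 ≤ c.toNat) := by
    have h97 : ('a').toNat = 97 := rfl
    rw [← h97]
    simp only [Char.le_def, UInt32.le_iff_toNat_le, Char.toNat]
    simp
  have hle2 : (c ≤ 'z') = decide (c.toNat ≤ 122) := by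
    have h122 : ('z').toNat = 122 := rfl
    rw [← h122]
    simp only [Char.le_def, UInt32.le_iff_toNat_le, Char.toNat]
    simp
  by_cases h : c ∈ strdir2Alphabet
  · simp [h, hle, hle2, (hm.mp h).1, (hm.mp h).2]
  · by_cases hs : c = ' '
    · subst hs; decide
    · have : ¬ (97 ≤ c.toNat ∧ c.toNat ≤ 122) := fun hh => h (hm.mpr hh)
      simp [h, hs, hle, hle2]
      omega

lemma strdir2_foldl (l acc : List Char) :
    l.foldl
      (fun strtext_data x =>
        if x ∈ strdir2Alphabet then strtext_data ++ [x]
        else if x = ' ' then strtext_data ++ [x]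
        else strtext_data)
      acc
    = acc ++ l.filter (fun c => ('a' ≤ c && c ≤ 'z') || c == ' ') := by
  induction l generalizing acc with
  | nil => simp
  | cons x xs ih =>
    have hc := strdir2_cond x
    by_cases h : x ∈ strdir2Alphabet
    · have : ('a' ≤ x && x ≤ 'z') || x == ' ' := by rw [← hc]; simp [h]
      simp [List.foldl, h, ih, List.filter, this]
    · by_cases hs : x = ' '
      · have : ('a' ≤ x && x ≤ 'z') || x == ' ' := by rw [← hc]; simp [h, hs]
        simp [List.foldl, h, hs, ih, List.filter, this]
      · have : (('a' ≤ x && x ≤ 'z') || x == ' ') = false := by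
          rw [← hc]; simp [h, hs]
        simp [List.foldl, h, hs, ih, List.filter, this]

-- ===== VERDICT (by name: the statement is the Claim_ definition above) =====
theorem strdir_2_spec : Claim_equal_strdir_2 := by
  intro t _
  unfold Spec_strdir_2 strdir_2 strdir_2_alt
  rw [strdir2_foldl]
  simp
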